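-- pv_equiv track=rewrite | github.com/GITTIIII/Compro2 | re code/week5.3.py | odd_and_sum
-- ===== SOURCE A (Python) =====
-- def odd_and_sum(lst):
--     sumodd=0
--     odd = []
--     for x in lst:
--         if x%2!=0:
--             sumodd += x
--             odd.append(x)
--     return(sumodd,odd)
-- ===== SOURCE B (Python) =====
-- def odd_and_sum(lst):
--     # Divide and conquer: split the list in half, solve each half, combine
--     # (sums add, odd sublists concatenate in order). Iteration-free.
--     def go(lo, hi):
--         n = hi - lo
--         if n == 0:
--             return (0, [])
--         if n == 1:
--             x = lst[lo]
--             return (x, [x]) if x % 2 != 0 else (0, [])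
--         mid = lo + n // 2
--         s1, o1 = go(lo, mid)
--         s2, o2 = go(mid, hi)
--         return (s1 + s2, o1 + o2)
--     return go(0, len(lst))
-- ===== Notes on version B (the rewrite author's own statement) =====
-- stated objective: alternative
-- what changed: A's single fused accumulator loop is replaced by a divide-and-conquer recursion: the list is split in half, each half solved recursively, and results combined (sums added, odd sublists concatenated in order).
import Mathlib
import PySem

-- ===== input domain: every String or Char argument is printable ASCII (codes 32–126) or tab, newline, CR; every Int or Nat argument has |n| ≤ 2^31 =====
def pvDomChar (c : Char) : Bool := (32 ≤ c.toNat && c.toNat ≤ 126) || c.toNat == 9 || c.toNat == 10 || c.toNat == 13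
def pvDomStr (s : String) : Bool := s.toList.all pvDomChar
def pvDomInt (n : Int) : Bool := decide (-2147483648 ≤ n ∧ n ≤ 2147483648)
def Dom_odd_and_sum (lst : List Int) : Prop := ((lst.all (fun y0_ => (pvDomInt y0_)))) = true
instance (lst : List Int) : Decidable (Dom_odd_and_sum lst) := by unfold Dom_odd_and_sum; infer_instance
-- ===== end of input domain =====

-- B replaces A's fused sum-and-collect loop by a divide-and-conquer recursion
-- (split in half, solve halves, add sums and concatenate odd sublists); objective: alternative.

-- ===== PORT A =====
-- A: one loop carrying (sumodd, odd); for odd x it adds to the sum and appends.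
def odd_and_sum (lst : List Int) : Int × List Int :=
  lst.foldl
    (fun st x =>
      if PySem.Int.mod x 2 ≠ 0 then (st.1 + x, st.2 ++ [x]) else st)
    (0, [])

-- ===== PORT B =====
-- B's helper go(lo,hi) works on the segment lst[lo:hi]; here that segment is the list itself,
-- the split at mid = lo + n//2 becoming take/drop at n//2.
def oddGo : List Int → Int × List Int
  | [] => (0, [])
  | [x] => if PySem.Int.mod x 2 ≠ 0 then (x, [x]) else (0, [])
  | x :: y :: rest =>
    let l := x :: y :: rest
    let m := l.length / 2
    let r1 := oddGo (l.take m)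
    let r2 := oddGo (l.drop m)
    (r1.1 + r2.1, r1.2 ++ r2.2)
termination_by l => l.length
decreasing_by
  · simp [List.length_take]; omega
  · simp [List.length_drop]; omega

def odd_and_sum_alt (lst : List Int) : Int × List Int :=
  oddGo lst

-- ===== PRECONDITION & SPEC =====
def Spec_odd_and_sum (lst : List Int) (out : Int × List Int) : Prop := out = odd_and_sum_alt lst
instance (lst : List Int) (out : Int × List Int) : Decidable (Spec_odd_and_sum lst out) := by unfold Spec_odd_and_sum; infer_instance

-- ===== CLAIM (what is proved, stated in full; the proofs are below) =====
def Claim_equal_odd_and_sum : Prop := ∀ (lst : List Int), Dom_odd_and_sum lst → Spec_odd_and_sum lst (odd_and_sum lst)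

-- ===== LEMMAS AND PROOFS =====
theorem odd_and_sum_foldl (lst : List Int) (s : Int) (acc : List Int) :
    lst.foldl
      (fun st x =>
        if PySem.Int.mod x 2 ≠ 0 then (st.1 + x, st.2 ++ [x]) else st)
      (s, acc)
    = (s + (lst.filter (fun x => PySem.Int.mod x 2 ≠ 0)).sum,
       acc ++ lst.filter (fun x => PySem.Int.mod x 2 ≠ 0)) := by
  induction lst generalizing s acc with
  | nil => simp
  | cons x xs ih =>
    rw [List.foldl_cons, List.filter_cons]
    by_cases h : PySem.Int.mod x 2 ≠ 0
    · rw [if_pos h, if_pos (by simpa using h), ih]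
      simp [add_assoc]
    · rw [if_neg h, if_neg (by simpa using h), ih]

theorem oddGo_eq (l : List Int) :
    oddGo l = ((l.filter (fun x => PySem.Int.mod x 2 ≠ 0)).sum,
               l.filter (fun x => PySem.Int.mod x 2 ≠ 0)) := by
  fun_induction oddGo l with
  | case1 => simp
  | case2 x h =>
    simp only [PySem.Int.mod] at h ⊢
    simp [h]
  | case3 x h =>
    simp only [PySem.Int.mod, ne_eq, not_not] at h ⊢
    simp [h]
  | case4 x y rest l m r1 r2 ihA ihB =>
    have e1 : r1 = ((List.filter (fun x => decide (PySem.Int.mod x 2 ≠ 0)) (List.take m l)).sum,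
      List.filter (fun x => decide (PySem.Int.mod x 2 ≠ 0)) (List.take m l)) := ihA
    have e2 : r2 = ((List.filter (fun x => decide (PySem.Int.mod x 2 ≠ 0)) (List.drop m l)).sum,
      List.filter (fun x => decide (PySem.Int.mod x 2 ≠ 0)) (List.drop m l)) := ihB
    rw [e1, e2]
    have hsplit : List.take m l ++ List.drop m l = l := List.take_append_drop m l
    simp only [Prod.mk.injEq]
    exact ⟨by rw [← List.sum_append, ← List.filter_append, hsplit],
           by rw [← List.filter_append, hsplit]⟩

-- ===== VERDICT (by name: the statement is the Claim_ definition above) =====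
theorem odd_and_sum_spec : Claim_equal_odd_and_sum := by
  intro lst _
  unfold Spec_odd_and_sum odd_and_sum odd_and_sum_alt
  rw [odd_and_sum_foldl, oddGo_eq]
  simp
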